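-- pv_equiv track=rewrite | github.com/mellowmarshall/mrp-paper | src/mrp/training.py | _find_existing_prefixes
-- ===== SOURCE A (Python) =====
-- def _find_existing_prefixes(
--     names: list[str],
--     candidates: tuple[str, ...],
-- ) -> tuple[str, ...]:
--     return tuple(
--         prefix for prefix in candidates
--         if prefix and any(name.startswith(prefix) for name in names)
--     )
-- ===== SOURCE B (Python) =====
-- def _find_existing_prefixes(
--     names: list[str],
--     candidates: tuple[str, ...],
-- ) -> tuple[str, ...]:
--     prefixes = set()
--     for name in names:
--         for i in range(1, len(name) + 1):
--             prefixes.add(name[:i])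
--     return tuple(p for p in candidates if p in prefixes)
-- ===== Notes on version B (the rewrite author's own statement) =====
-- stated objective: faster
-- what changed: B precomputes the set of all nonempty prefixes of the names once, then decides each candidate by a single set-membership lookup instead of scanning all names per candidate.
import Mathlib
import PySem

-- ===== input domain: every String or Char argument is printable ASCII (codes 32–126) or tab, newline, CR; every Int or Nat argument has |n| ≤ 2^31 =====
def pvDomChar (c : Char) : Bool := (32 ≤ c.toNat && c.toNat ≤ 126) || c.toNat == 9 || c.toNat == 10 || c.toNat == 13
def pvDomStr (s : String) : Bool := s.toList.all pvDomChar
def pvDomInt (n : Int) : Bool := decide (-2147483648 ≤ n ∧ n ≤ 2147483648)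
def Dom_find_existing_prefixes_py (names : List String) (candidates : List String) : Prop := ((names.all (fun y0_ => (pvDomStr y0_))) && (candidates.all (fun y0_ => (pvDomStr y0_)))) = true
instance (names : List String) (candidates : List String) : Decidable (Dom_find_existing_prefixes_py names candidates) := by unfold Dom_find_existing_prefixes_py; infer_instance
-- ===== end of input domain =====

-- B replaces A's per-candidate scan of all names by one precomputed set of all nonempty
-- prefixes of the names, then a single membership lookup per candidate (objective: faster).

-- ===== PORT A =====
-- tuple(prefix for prefix in candidates if prefix and any(name.startswith(prefix) for name in names))
def find_existing_prefixes_py (names : List String) (candidates : List String) : List String :=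
  candidates.filter (fun p => decide (p ≠ "") && names.any (fun n => PySem.Str.startswith n p))

-- ===== PORT B =====
-- prefixes = set(); for name in names: for i in range(1, len(name)+1): prefixes.add(name[:i])
-- return tuple(p for p in candidates if p in prefixes)
def find_existing_prefixes_py_alt (names : List String) (candidates : List String) : List String :=
  let prefixes : PySem.Set String :=
    names.foldl
      (fun s n =>
        (PySem.List.pyRange 1 ((PySem.Str.len n : Int) + 1) 1).foldl
          (fun s i => PySem.Set.add s (PySem.Str.slice n none (some i))) s)
      PySem.Set.empty
  candidates.filter (fun p => PySem.Set.contains prefixes p)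

-- ===== PRECONDITION & SPEC =====
def Spec_find_existing_prefixes_py (names : List String) (candidates : List String) (out : List String) : Prop := out = find_existing_prefixes_py_alt names candidates
instance (names : List String) (candidates : List String) (out : List String) : Decidable (Spec_find_existing_prefixes_py names candidates out) := by unfold Spec_find_existing_prefixes_py; infer_instance

-- ===== CLAIM (what is proved, stated in full; the proofs are below) =====
def Claim_equal_find_existing_prefixes_py : Prop := ∀ (names : List String) (candidates : List String), Dom_find_existing_prefixes_py names candidates → Spec_find_existing_prefixes_py names candidates (find_existing_prefixes_py names candidates)

-- ===== LEMMAS AND PROOFS =====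

-- membership in B's prefix set, after unfolding the inner loop with Set.mem_foldl_add
lemma mem_prefix_fold (names : List String) (s : PySem.Set String) (p : String) :
    p ∈ names.foldl
      (fun s n =>
        (PySem.List.pyRange 1 ((PySem.Str.len n : Int) + 1) 1).foldl
          (fun s i => PySem.Set.add s (PySem.Str.slice n none (some i))) s)
      s
    ↔ p ∈ s ∨ ∃ n ∈ names, ∃ i ∈ PySem.List.pyRange 1 ((PySem.Str.len n : Int) + 1) 1,
        p = PySem.Str.slice n none (some i) := by
  induction names generalizing s with
  | nil => simp
  | cons n ns ih =>
    simp only [List.foldl_cons, ih, PySem.Set.mem_foldl_add, List.mem_cons]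
    constructor
    · rintro (⟨h | ⟨i, hi, rfl⟩⟩ | ⟨m, hm, hrest⟩)
      · exact .inl h
      · exact .inr ⟨n, .inl rfl, i, hi, rfl⟩
      · exact .inr ⟨m, .inr hm, hrest⟩
    · rintro (h | ⟨m, (rfl | hm), hrest⟩)
      · exact .inl (.inl h)
      · exact .inl (.inr (by simpa using hrest))
      · exact .inr ⟨m, hm, hrest⟩

-- p is a slice n[:i] for some 1 ≤ i ≤ len(n)  ↔  n startswith p and p nonempty
lemma slice_iff_startswith (n p : String) :
    (∃ i ∈ PySem.List.pyRange 1 ((PySem.Str.len n : Int) + 1) 1,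
        p = PySem.Str.slice n none (some i))
    ↔ (PySem.Str.startswith n p = true ∧ p ≠ "") := by
  constructor
  · rintro ⟨i, hi, rfl⟩
    rw [PySem.List.mem_pyRange_one] at hi
    obtain ⟨h1, h2⟩ := hi
    have hnn : (0 : Int) ≤ i := by omega
    have htake : (PySem.Str.slice n none (some i)).toList = n.toList.take i.toNat := by
      rw [PySem.Str.toList_slice]
      rw [PySem.Chars.slice_eq_listSlice, PySem.List.slice_to _ hnn]
    constructor
    · rw [PySem.Str.startswith_eq, PySem.Chars.startswith_iff, htake]
      exact List.take_prefix _ _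
    · intro h
      have : (PySem.Str.slice n none (some i)).toList = [] := by rw [h]; rfl
      rw [htake] at this
      have hlen : n.toList.length = PySem.Str.len n := (PySem.Str.len_eq n).symm
      have : min i.toNat n.toList.length = 0 := by
        simpa [List.take_eq_nil_iff] using this
      omega
  · rintro ⟨hsw, hne⟩
    rw [PySem.Str.startswith_eq, PySem.Chars.startswith_iff] at hsw
    have hlenp : 0 < p.toList.length := by
      cases hp : p.toList with
      | nil => exact absurd (String.toList_inj.mp (by rw [hp]; rfl)) hne
      | cons a l => simp
    have hle : p.toList.length ≤ n.toList.length := hsw.length_le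
    refine ⟨(p.toList.length : Int), ?_, ?_⟩
    · rw [PySem.List.mem_pyRange_one]
      have : n.toList.length = PySem.Str.len n := (PySem.Str.len_eq n).symm
      omega
    · have htake : (PySem.Str.slice n none (some (p.toList.length : Int))).toList
          = n.toList.take p.toList.length := by
        rw [PySem.Str.toList_slice]
        rw [PySem.Chars.slice_eq_listSlice, PySem.List.slice_to _ (by positivity : (0:Int) ≤ (p.toList.length : Int))]
        simp
      apply String.toList_inj.mp
      rw [htake]
      exact List.prefix_iff_eq_take.mp hsw

-- A's test equals B's test on every string
lemma test_eq (names : List String) (p : String) :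
    (decide (p ≠ "") && names.any (fun n => PySem.Str.startswith n p))
    = PySem.Set.contains
        (names.foldl
          (fun s n =>
            (PySem.List.pyRange 1 ((PySem.Str.len n : Int) + 1) 1).foldl
              (fun s i => PySem.Set.add s (PySem.Str.slice n none (some i))) s)
          PySem.Set.empty) p := by
  rw [Bool.eq_iff_iff]
  rw [PySem.Set.contains_iff, mem_prefix_fold]
  simp only [Bool.and_eq_true, decide_eq_true_eq, List.any_eq_true, PySem.Set.empty,
    List.not_mem_nil, false_or]
  constructor
  · rintro ⟨hne, n, hn, hsw⟩
    exact ⟨n, hn, (slice_iff_startswith n p).mpr ⟨hsw, hne⟩⟩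
  · rintro ⟨n, hn, hsl⟩
    obtain ⟨hsw, hne⟩ := (slice_iff_startswith n p).mp hsl
    exact ⟨hne, n, hn, hsw⟩

-- ===== VERDICT (by name: the statement is the Claim_ definition above) =====
theorem find_existing_prefixes_py_spec : Claim_equal_find_existing_prefixes_py := by
  intro names candidates _
  unfold Spec_find_existing_prefixes_py find_existing_prefixes_py find_existing_prefixes_py_alt
  exact List.filter_congr (fun p _ => test_eq names p)
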